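-- pv_equiv track=rewrite | github.com/ProteinUniverseAtlas/protscape | scripts/.ipynb_checkpoints/astrochop-checkpoint.py | convert_map_to_interval
-- ===== SOURCE A (Python) =====
-- def convert_map_to_interval(resmap):
--
-- 	domains = {}
-- 	for i, pred in enumerate(resmap):
-- 		if pred is not None:
-- 			if pred not in domains:
-- 				domains[pred] = []
-- 			domains[pred].append(i)
--
-- 	for domain in domains:
-- 		parts = [[]]
-- 		for i in domains[domain]:
-- 			if len(parts[-1]) == 0 or i - parts[-1][-1] == 1:
-- 				parts[-1].append(i)
--
-- 			else:
-- 				parts.append([i])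
--
-- 		for i in range(len(parts)):
-- 			parts[i] = '{}-{}'.format(min(parts[i])+1, max(parts[i])+1)
--
-- 		if len(parts) > 1:
-- 			domains[domain] = '_'.join(parts)
-- 		else:
-- 			domains[domain] = parts[0]
--
-- 	return list(domains.values())
-- ===== SOURCE B (Python) =====
-- def convert_map_to_interval(resmap):
--     intervals = {}
--     for i, pred in enumerate(resmap):
--         if pred is None:
--             continue
--         ivs = intervals.get(pred, [])
--         if ivs and ivs[-1][1] == i - 1:
--             ivs[-1][1] = i
--         else:
--             ivs.append([i, i])
--         intervals[pred] = ivs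
--     return ['_'.join('{}-{}'.format(s + 1, e + 1) for s, e in ivs)
--             for ivs in intervals.values()]
-- ===== Notes on version B (the rewrite author's own statement) =====
-- stated objective: alternative
-- what changed: B builds the interval runs directly in one pass over resmap (extend the label's last interval or open a new one), instead of A's collect-all-indices pass followed by a regrouping pass with min/max over each group.
import Mathlib
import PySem

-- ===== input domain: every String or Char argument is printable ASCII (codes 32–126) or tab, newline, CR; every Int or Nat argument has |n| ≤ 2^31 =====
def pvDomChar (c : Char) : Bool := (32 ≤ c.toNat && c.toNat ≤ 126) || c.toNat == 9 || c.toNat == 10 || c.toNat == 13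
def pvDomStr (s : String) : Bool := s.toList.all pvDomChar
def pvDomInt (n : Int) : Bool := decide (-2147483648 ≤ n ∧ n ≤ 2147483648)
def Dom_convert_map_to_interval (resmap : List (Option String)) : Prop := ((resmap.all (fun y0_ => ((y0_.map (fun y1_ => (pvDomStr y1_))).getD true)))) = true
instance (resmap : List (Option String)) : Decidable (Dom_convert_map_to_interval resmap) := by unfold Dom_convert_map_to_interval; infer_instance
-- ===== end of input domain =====

-- B replaces A's two-phase algorithm (collect every index per label, then regroup the
-- index lists into runs and take min/max of each run) by a single pass that maintains,
-- per label, the list of closed intervals directly (extend-or-open); same return value.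

-- ===== PORT A =====

-- 'min(part)'/'max(part)' as the running fold (PySem.List.min?_id_cons / max?_id_cons);
-- part = [] never occurs (Python min([]) would raise), the "" branch is unreachable.
def cmiFormatPart (part : List Int) : String :=
  match part with
  | [] => ""
  | h :: t =>
      PySem.Int.toStr (t.foldl min h + 1) ++ "-" ++ PySem.Int.toStr (t.foldl max h + 1)

-- inner loop of A's second phase; the growing 'parts' list is kept most-recent-first
-- (head = Python parts[-1]) and reversed after the loop.
def cmiStepA (parts : List (List Int)) (i : Int) : List (List Int) :=
  match parts with
  | [] => [[i]]  -- unreachable: the loop starts from [[]]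
  | last :: rest =>
      if last.length == 0 || i - last.getLastD 0 == 1 then (last ++ [i]) :: rest
      else [i] :: last :: rest

-- A's second phase for one domain: group its index list into consecutive runs,
-- format each run, join with '_' (or the single string when there is one part).
def cmiPhase2 (idxs : List Int) : String :=
  let parts := (idxs.foldl cmiStepA [[]]).reverse
  let strs := parts.map cmiFormatPart
  if strs.length > 1 then PySem.Str.join "_" strs else strs.headD ""

-- Python mutates domains[domain] in place while iterating, which keeps the insertion
-- order of the keys; list(domains.values()) is therefore values-order map of phase 2.
def convert_map_to_interval (resmap : List (Option String)) : List String :=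
  let domains : PySem.Dict String (List Int) :=
    (PySem.List.enumerate resmap).foldl
      (fun d p =>
        match p.2 with
        | none => d
        | some pred => d.insert pred (d.getD pred [] ++ [p.1]))
      PySem.Dict.empty
  domains.values.map cmiPhase2

-- ===== PORT B =====

-- per-label interval list, kept most-recent-first (head = Python ivs[-1]);
-- extend the latest interval when it ends at i-1, else open [i, i].
def cmiStepB (ivs : List (Int × Int)) (i : Int) : List (Int × Int) :=
  match ivs with
  | (s, e) :: rest => if e == i - 1 then (s, i) :: rest else (i, i) :: (s, e) :: rest
  | [] => [(i, i)]

def convert_map_to_interval_alt (resmap : List (Option String)) : List String :=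
  let intervals : PySem.Dict String (List (Int × Int)) :=
    (PySem.List.enumerate resmap).foldl
      (fun d p =>
        match p.2 with
        | none => d
        | some pred => d.insert pred (cmiStepB (d.getD pred []) p.1))
      PySem.Dict.empty
  intervals.values.map (fun ivs =>
    PySem.Str.join "_"
      (ivs.reverse.map (fun p => PySem.Int.toStr (p.1 + 1) ++ "-" ++ PySem.Int.toStr (p.2 + 1))))

-- ===== PRECONDITION & SPEC =====
def Spec_convert_map_to_interval (resmap : List (Option String)) (out : List String) : Prop := out = convert_map_to_interval_alt resmap
instance (resmap : List (Option String)) (out : List String) : Decidable (Spec_convert_map_to_interval resmap out) := by unfold Spec_convert_map_to_interval; infer_instance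

-- ===== CLAIM (what is proved, stated in full; the proofs are below) =====
def Claim_equal_convert_map_to_interval : Prop := ∀ (resmap : List (Option String)), Dom_convert_map_to_interval resmap → Spec_convert_map_to_interval resmap (convert_map_to_interval resmap)

-- ===== LEMMAS AND PROOFS =====

-- the interval [s, e] as the explicit list of its integers
def cmiIval (s e : Int) : List Int := (List.range (e + 1 - s).toNat).map (fun (k : Nat) => s + (k : Int))

-- B's runs of an index list, computed a posteriori
def cmiRuns (idxs : List Int) : List (Int × Int) := idxs.foldl cmiStepB []

theorem cmiIval_nil {s e : Int} (h : e < s) : cmiIval s e = [] := by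
  unfold cmiIval
  have : (e + 1 - s).toNat = 0 := by omega
  simp [this]

theorem cmiIval_cons {s e : Int} (h : s ≤ e) : cmiIval s e = s :: cmiIval (s + 1) e := by
  unfold cmiIval
  have h1 : (e + 1 - s).toNat = (e + 1 - (s + 1)).toNat + 1 := by omega
  rw [h1, List.range_succ_eq_map]
  rw [List.map_cons, List.map_map]
  congr 1
  · norm_num
  · refine List.map_congr_left ?_
    intro k _
    simp only [Function.comp_apply, Nat.succ_eq_add_one]
    push_cast
    ring

theorem cmiIval_concat {s e : Int} (h : s ≤ e + 1) :
    cmiIval s (e + 1) = cmiIval s e ++ [e + 1] := by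
  unfold cmiIval
  have h1 : (e + 1 + 1 - s).toNat = (e + 1 - s).toNat + 1 := by omega
  rw [h1, List.range_succ]
  simp
  omega

theorem cmiIval_mem {s e y : Int} : y ∈ cmiIval s e ↔ s ≤ y ∧ y ≤ e := by
  unfold cmiIval
  constructor
  · intro hy
    obtain ⟨k, hk, rfl⟩ := List.mem_map.mp hy
    have := List.mem_range.mp hk
    omega
  · rintro ⟨h1, h2⟩
    exact List.mem_map.mpr ⟨(y - s).toNat, List.mem_range.mpr (by omega), by omega⟩

theorem cmiIval_ne_nil {s e : Int} (h : s ≤ e) : cmiIval s e ≠ [] := by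
  rw [cmiIval_cons h]; simp

theorem cmiIval_getLastD {s e : Int} (h : s ≤ e) : (cmiIval s e).getLastD 0 = e := by
  have hn : 0 ≤ e - s := by omega
  obtain ⟨n, hn⟩ : ∃ n : Nat, e = s + n := ⟨(e - s).toNat, by omega⟩
  subst hn
  induction n generalizing s with
  | zero => simp at h; rw [cmiIval_cons (by omega), cmiIval_nil (by omega)]; simp
  | succ m ih =>
      have : s + (↑m + 1 : Nat) = (s + m) + 1 := by push_cast; ring
      rw [this, cmiIval_concat (by omega)]
      simp

theorem foldl_min_eq_of_le {t : List Int} {x : Int} (h : ∀ y ∈ t, x ≤ y) :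
    t.foldl min x = x := by
  induction t generalizing x with
  | nil => rfl
  | cons a t ih =>
      have hxa : min x a = x := by
        have := h a (by simp); omega
      simp only [List.foldl_cons, hxa]
      exact ih (fun y hy => h y (by simp [hy]))

theorem foldl_max_eq {t : List Int} {x m : Int} (hub : ∀ y ∈ t, y ≤ m)
    (hmem : m ∈ t ∨ x = m) (hx : x ≤ m) : t.foldl max x = m := by
  induction t generalizing x with
  | nil =>
      rcases hmem with h | h
      · simp at h
      · exact h
  | cons a t ih =>
      simp only [List.foldl_cons]
      by_cases hm : m ∈ t
      · exact ih (fun y hy => hub y (by simp [hy])) (Or.inl hm)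
          (max_le hx (hub a (by simp)))
      · have ha : a = m ∨ x = m := by
          rcases hmem with h | h
          · rcases List.mem_cons.mp h with h | h
            · exact Or.inl h.symm
            · exact absurd h hm
          · exact Or.inr h
        have hmax : max x a = m := by
          have := hub a (by simp); omega
        rw [hmax]
        exact ih (fun y hy => hub y (by simp [hy])) (Or.inr rfl) le_rfl

theorem cmiFormatPart_ival {s e : Int} (h : s ≤ e) :
    cmiFormatPart (cmiIval s e) =
      PySem.Int.toStr (s + 1) ++ "-" ++ PySem.Int.toStr (e + 1) := by
  rw [cmiIval_cons h]
  show PySem.Int.toStr ((cmiIval (s + 1) e).foldl min s + 1) ++ "-" ++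
      PySem.Int.toStr ((cmiIval (s + 1) e).foldl max s + 1) = _
  have hmin : (cmiIval (s + 1) e).foldl min s = s :=
    foldl_min_eq_of_le (fun y hy => by have := (cmiIval_mem.mp hy).1; omega)
  have hmax : (cmiIval (s + 1) e).foldl max s = e := by
    by_cases hse : s = e
    · subst hse
      rw [cmiIval_nil (by omega)]; rfl
    · exact foldl_max_eq (fun y hy => (cmiIval_mem.mp hy).2)
        (Or.inl (cmiIval_mem.mpr ⟨by omega, le_rfl⟩)) h
  rw [hmin, hmax]

-- the relation between A's 'parts' state and B's interval state (both most-recent-first)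
def cmiRel (parts : List (List Int)) (ivs : List (Int × Int)) : Prop :=
  parts = ivs.map (fun p => cmiIval p.1 p.2) ∧ ∀ p ∈ ivs, p.1 ≤ p.2

theorem cmiRel_step {parts : List (List Int)} {ivs : List (Int × Int)} (h : cmiRel parts ivs)
    (i : Int) : cmiRel (cmiStepA parts i) (cmiStepB ivs i) := by
  obtain ⟨hp, hb⟩ := h
  subst hp
  match ivs with
  | [] =>
      constructor
      · simp [cmiStepA, cmiStepB, cmiIval_cons (le_refl i), cmiIval_nil (show i < i + 1 by omega)]
      · intro p hp
        simp [cmiStepB] at hp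
        subst hp
        simp
  | (s, e) :: rest =>
      have hse : s ≤ e := hb (s, e) (by simp)
      have hne : ((cmiIval s e).length == 0) = false := by
        cases hq : cmiIval s e with
        | nil => exact absurd hq (cmiIval_ne_nil hse)
        | cons a t => simp
      simp only [List.map_cons, cmiStepA, cmiStepB, hne, Bool.false_or,
        cmiIval_getLastD hse]
      by_cases hcond : e = i - 1
      · have h1 : (i - e == 1) = true := by simp; omega
        have h2 : (e == i - 1) = true := by simp [hcond]
        rw [h1, h2]
        simp only [if_true]
        constructor
        · have : i = e + 1 := by omega
          subst this
          rw [← cmiIval_concat (by omega)]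
          simp
        · intro p hp
          rcases List.mem_cons.mp hp with h | h
          · subst h; simp; omega
          · exact hb p (by simp [h])
      · have h1 : (i - e == 1) = false := by simp; omega
        have h2 : (e == i - 1) = false := by simp [hcond]
        rw [h1, h2]
        simp only [Bool.false_eq_true, if_false]
        constructor
        · simp [cmiIval_cons (le_refl i), cmiIval_nil (show i < i + 1 by omega)]
        · intro p hp
          rcases List.mem_cons.mp hp with h | h
          · subst h; simp
          · exact hb p h
  
theorem cmiRel_foldl {l : List Int} {parts : List (List Int)} {ivs : List (Int × Int)}
    (h : cmiRel parts ivs) : cmiRel (l.foldl cmiStepA parts) (l.foldl cmiStepB ivs) := by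
  induction l generalizing parts ivs with
  | nil => exact h
  | cons a l ih => exact ih (cmiRel_step h a)

-- the length-1 special case of A's join is the join itself ('_'.join([x]) = x, ''.join([]) = '')
theorem cmiJoin_if (strs : List String) :
    (if strs.length > 1 then PySem.Str.join "_" strs else strs.headD "")
      = PySem.Str.join "_" strs := by
  match strs with
  | [] => rfl
  | [x] => simp [PySem.Str.join]
  | x :: y :: t => simp

-- per-index-list agreement: A's phase 2 equals B's formatting of the runs
theorem cmiPhase2_eq_runs (l : List Int) :
    cmiPhase2 l =
      PySem.Str.join "_"
        ((cmiRuns l).reverse.map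
          (fun p => PySem.Int.toStr (p.1 + 1) ++ "-" ++ PySem.Int.toStr (p.2 + 1))) := by
  match l with
  | [] => rfl
  | i :: l =>
      have hfirst : cmiStepA [[]] i = [[i]] := by simp [cmiStepA]
      have hrel : cmiRel (List.foldl cmiStepA [[i]] l) (List.foldl cmiStepB [(i, i)] l) :=
        cmiRel_foldl ⟨by simp [cmiIval_cons (le_refl i), cmiIval_nil (show i < i + 1 by omega)],
          by simp⟩
      obtain ⟨hp, hb⟩ := hrel
      unfold cmiPhase2 cmiRuns
      simp only [List.foldl_cons, hfirst, show cmiStepB [] i = [(i, i)] from rfl]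
      rw [hp]
      set ivs := List.foldl cmiStepB [(i, i)] l with hivs
      have hs : (List.map (fun p => cmiIval p.1 p.2) ivs).reverse.map cmiFormatPart
          = ivs.reverse.map (fun p => PySem.Int.toStr (p.1 + 1) ++ "-" ++ PySem.Int.toStr (p.2 + 1)) := by
        rw [← List.map_reverse, List.map_map]
        refine List.map_congr_left ?_
        intro p hp'
        exact cmiFormatPart_ival (hb p (List.mem_reverse.mp hp'))
      rw [hs, cmiJoin_if]

-- skipping None entries = folding over the lifted (index, label) pairs
theorem cmiFoldA_eq (l : List (Int × Option String)) (d : PySem.Dict String (List Int)) :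
    l.foldl
        (fun d p =>
          match p.2 with
          | none => d
          | some pred => d.insert pred (d.getD pred [] ++ [p.1])) d
      = (l.filterMap (fun p => p.2.map (fun s => (p.1, s)))).foldl
          (fun d q => d.insert q.2 (d.getD q.2 [] ++ [q.1])) d := by
  induction l generalizing d with
  | nil => rfl
  | cons a l ih => cases h : a.2 <;> simp [h, ih]

theorem cmiFoldB_eq (l : List (Int × Option String)) (d : PySem.Dict String (List (Int × Int))) :
    l.foldl
        (fun d p =>
          match p.2 with
          | none => d
          | some pred => d.insert pred (cmiStepB (d.getD pred []) p.1)) d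
      = (l.filterMap (fun p => p.2.map (fun s => (p.1, s)))).foldl
          (fun d q => d.insert q.2 (cmiStepB (d.getD q.2 []) q.1)) d := by
  induction l generalizing d with
  | nil => rfl
  | cons a l ih => cases h : a.2 <;> simp [h, ih]

-- B's dict value is always cmiRuns of A's dict value
theorem cmiDict_getD_inv (pairs : List (Int × String))
    (dA : PySem.Dict String (List Int)) (dB : PySem.Dict String (List (Int × Int)))
    (h : ∀ k, dB.getD k [] = cmiRuns (dA.getD k []))
    (k : String) :
    (pairs.foldl (fun d q => d.insert q.2 (cmiStepB (d.getD q.2 []) q.1)) dB).getD k []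
      = cmiRuns ((pairs.foldl (fun d q => d.insert q.2 (d.getD q.2 [] ++ [q.1])) dA).getD k []) := by
  induction pairs generalizing dA dB with
  | nil => exact h k
  | cons a pairs ih =>
      simp only [List.foldl_cons]
      refine ih _ _ ?_
      intro k'
      by_cases hk : k' = a.2
      · subst hk
        rw [PySem.Dict.getD_insert_self, PySem.Dict.getD_insert_self, h]
        unfold cmiRuns
        rw [List.foldl_append]
        rfl
      · rw [PySem.Dict.getD_insert_of_ne _ _ _ hk, PySem.Dict.getD_insert_of_ne _ _ _ hk, h]

-- ===== VERDICT (by name: the statement is the Claim_ definition above) =====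
theorem convert_map_to_interval_spec : Claim_equal_convert_map_to_interval := by
  intro resmap _
  unfold Spec_convert_map_to_interval
  show convert_map_to_interval resmap = convert_map_to_interval_alt resmap
  simp only [convert_map_to_interval, convert_map_to_interval_alt]
  rw [cmiFoldA_eq, cmiFoldB_eq]
  set pairs := (PySem.List.enumerate resmap).filterMap (fun p => p.2.map (fun s => (p.1, s)))
    with hpairs
  set dA := pairs.foldl (fun d q => d.insert q.2 (d.getD q.2 [] ++ [q.1])) PySem.Dict.empty
    with hdA
  set dB := pairs.foldl (fun d q => d.insert q.2 (cmiStepB (d.getD q.2 []) q.1)) PySem.Dict.empty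
    with hdB
  have hndA : dA.keys.Nodup := by
    rw [hdA]
    exact PySem.Dict.nodup_keys_foldl_insert_key pairs (fun q => q.2)
      (fun d q => d.getD q.2 [] ++ [q.1]) _ PySem.Dict.nodup_keys_empty
  have hndB : dB.keys.Nodup := by
    rw [hdB]
    exact PySem.Dict.nodup_keys_foldl_insert_key pairs (fun q => q.2)
      (fun d q => cmiStepB (d.getD q.2 []) q.1) _ PySem.Dict.nodup_keys_empty
  have hkA : dA.keys = PySem.Set.update [] (pairs.map (fun q => q.2)) := by
    rw [hdA, PySem.Dict.keys_foldl_insert_key (key := fun q => q.2)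
      (f := fun d q => d.getD q.2 [] ++ [q.1]) (l := pairs) (d := PySem.Dict.empty)]
    rfl
  have hkB : dB.keys = PySem.Set.update [] (pairs.map (fun q => q.2)) := by
    rw [hdB, PySem.Dict.keys_foldl_insert_key (key := fun q => q.2)
      (f := fun d q => cmiStepB (d.getD q.2 []) q.1) (l := pairs) (d := PySem.Dict.empty)]
    rfl
  have hinv : ∀ k, dB.getD k [] = cmiRuns (dA.getD k []) := by
    intro k
    rw [hdA, hdB]
    exact cmiDict_getD_inv pairs PySem.Dict.empty PySem.Dict.empty
      (fun k' => by rw [PySem.Dict.getD_empty, PySem.Dict.getD_empty]; rfl) k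
  rw [PySem.Dict.values_eq_map_keys dA hndA [], PySem.Dict.values_eq_map_keys dB hndB [],
    hkA, hkB, List.map_map, List.map_map]
  refine List.map_congr_left ?_
  intro k _
  simp only [Function.comp_apply]
  rw [hinv k]
  exact cmiPhase2_eq_runs _
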